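-- pv_equiv track=rewrite | github.com/XyzHuy/-DL-Fine-tuning-coding-model | data/solution/Solution2354.py | countExcellentPairs
-- ===== SOURCE A (Python) =====
-- from collections import Counter
-- from typing import List
--
-- def countExcellentPairs(nums: List[int], k: int) -> int:
--     # Use a set to remove duplicates and then count the number of set bits for each unique number
--     set_bits_count = Counter(map(lambda x: bin(x).count('1'), set(nums)))
--
--     # Initialize the result
--     result = 0
--
--     # Iterate over all possible pairs of set bits counts
--     for i in set_bits_count:
--         for j in set_bits_count:
--             if i + j >= k:
--                 result += set_bits_count[i] * set_bits_count[j]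
--
--     return result
-- ===== SOURCE B (Python) =====
-- def countExcellentPairs(nums, k):
--     # Frequency table of set-bit counts over the distinct numbers (bit counts fit in 0..32
--     # for |n| <= 2^31), then a suffix-sum table answering "how many distinct numbers have
--     # bit count >= t" in O(1), replacing A's nested pair loop by one linear pass.
--     freq = [0] * 33
--     for x in set(nums):
--         freq[bin(x).count('1')] += 1
--     suffix = [0] * 34
--     for t in range(32, -1, -1):
--         suffix[t] = suffix[t + 1] + freq[t]
--     total = 0
--     for i in range(33):
--         t = k - i
--         if t <= 0:
--             total += freq[i] * suffix[0]
--         elif t <= 32: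
--             total += freq[i] * suffix[t]
--     return total
-- ===== Notes on version B (the rewrite author's own statement) =====
-- stated objective: alternative
-- what changed: Replaces A's nested loop over all ordered pairs of counter keys by a fixed 33-entry frequency table of set-bit counts plus a suffix-sum table, so each bit count is paired with a single O(1) 'how many distinct numbers have bit count >= k-i' lookup instead of an inner scan.
import Mathlib
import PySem

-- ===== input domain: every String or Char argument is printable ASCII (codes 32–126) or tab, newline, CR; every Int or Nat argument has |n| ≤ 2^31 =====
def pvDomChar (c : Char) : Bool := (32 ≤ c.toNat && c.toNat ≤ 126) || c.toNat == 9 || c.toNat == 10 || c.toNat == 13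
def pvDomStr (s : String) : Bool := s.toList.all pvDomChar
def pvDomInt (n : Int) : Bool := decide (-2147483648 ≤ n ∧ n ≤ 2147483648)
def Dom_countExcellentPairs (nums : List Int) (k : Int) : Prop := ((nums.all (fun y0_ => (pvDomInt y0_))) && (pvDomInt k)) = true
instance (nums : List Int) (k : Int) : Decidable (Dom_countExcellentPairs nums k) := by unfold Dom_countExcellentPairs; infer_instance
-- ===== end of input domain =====

-- B replaces A's nested loop over counter key pairs by a 33-entry frequency table of
-- set-bit counts plus a suffix-sum table queried once per bit count (objective: alternative).

-- ===== PORT A =====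
-- bin(x).count('1') is PySem.Int.bitCount (reads |x|, Python-exact on negatives).
-- A builds Counter(map(..., set(nums))) and sums c[i]*c[j] over ordered key pairs; the
-- result is independent of the set/counter iteration order, so Set.ofList order is exact.
def countExcellentPairs (nums : List Int) (k : Int) : Int :=
  let set_bits_count := PySem.Dict.counter
      ((PySem.Set.ofList nums).map (fun x => (PySem.Int.bitCount x : Int)))
  set_bits_count.keys.foldl (fun result i =>
    set_bits_count.keys.foldl (fun result j =>
      if i + j ≥ k then result + set_bits_count.getD i 0 * set_bits_count.getD j 0
      else result) result) 0

-- ===== PORT B =====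
def countExcellentPairs_alt (nums : List Int) (k : Int) : Int :=
  let freq := (PySem.Set.ofList nums).foldl
      (fun f x => PySem.List.pySetD f (PySem.Int.bitCount x : Int)
                    (PySem.List.pyGetD f (PySem.Int.bitCount x : Int) 0 + 1))
      (List.replicate 33 0)
  let suffix := (PySem.List.pyRange 32 (-1) (-1)).foldl
      (fun s t => PySem.List.pySetD s t
        (PySem.List.pyGetD s (t + 1) 0 + PySem.List.pyGetD freq t 0))
      (List.replicate 34 0)
  (PySem.List.pyRange 0 33 1).foldl (fun total i =>
      let t := k - i
      if t ≤ 0 then total + PySem.List.pyGetD freq i 0 * PySem.List.pyGetD suffix 0 0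
      else if t ≤ 32 then total + PySem.List.pyGetD freq i 0 * PySem.List.pyGetD suffix t 0
      else total) 0

-- ===== PRECONDITION & SPEC =====
def Spec_countExcellentPairs (nums : List Int) (k : Int) (out : Int) : Prop := out = countExcellentPairs_alt nums k
instance (nums : List Int) (k : Int) (out : Int) : Decidable (Spec_countExcellentPairs nums k out) := by unfold Spec_countExcellentPairs; infer_instance

-- ===== CLAIM (what is proved, stated in full; the proofs are below) =====
def Claim_equal_countExcellentPairs : Prop := ∀ (nums : List Int) (k : Int), Dom_countExcellentPairs nums k → Spec_countExcellentPairs nums k (countExcellentPairs nums k)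

-- ===== LEMMAS AND PROOFS =====

-- the list of set-bit counts of the distinct numbers
def pvBits (nums : List Int) : List Int :=
  (PySem.Set.ofList nums).map (fun x => (PySem.Int.bitCount x : Int))

-- number of entries of l that are ≥ t
def pvGE (l : List Int) (t : Int) : Int := (l.countP (fun b => t ≤ b) : Int)

-- the common value both programs compute: for each distinct bit count a (with multiplicity)
-- the number of distinct bit counts b (with multiplicity) such that a + b ≥ k
def pvC (nums : List Int) (k : Int) : Int :=
  ((pvBits nums).map (fun a => pvGE (pvBits nums) (k - a))).sum

lemma pv_sum_pick (g : Int → Int) : ∀ (K : List Int) (x : Int), K.Nodup → x ∈ K →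
    (K.map (fun i => (if i = x then (1:Int) else 0) * g i)).sum = g x := by
  intro K
  induction K with
  | nil => intro x _ hx; cases hx
  | cons a K ih =>
    intro x hnd hx
    simp only [List.map_cons, List.sum_cons]
    rcases List.mem_cons.mp hx with rfl | hx'
    · have h0 : ∀ i ∈ K, (if i = x then (1:Int) else 0) * g i = 0 := by
        intro i hi
        have : i ≠ x := by rintro rfl; exact (List.nodup_cons.mp hnd).1 hi
        simp [this]
      rw [List.sum_eq_zero (by simpa using h0)]
      simp
    · have hax : a ≠ x := by rintro rfl; exact (List.nodup_cons.mp hnd).1 hx'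
      rw [ih x (List.nodup_cons.mp hnd).2 hx']
      simp [hax]

lemma pv_sum_count_mul (g : Int → Int) : ∀ (l K : List Int), K.Nodup → (∀ x ∈ l, x ∈ K) →
    (K.map (fun i => ((l.count i : Int)) * g i)).sum = (l.map g).sum := by
  intro l
  induction l with
  | nil => intro K _ _; simp
  | cons x l ih =>
    intro K hnd hsub
    have hx : x ∈ K := hsub x (List.mem_cons_self ..)
    have h1 : ∀ i : Int, (((x :: l).count i : Int)) * g i
        = ((l.count i : Int)) * g i + (if i = x then (1:Int) else 0) * g i := by
      intro i
      by_cases h : i = x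
      · subst h; rw [List.count_cons_self]; push_cast; ring_nf; simp
      · rw [List.count_cons_of_ne (fun he => h he.symm)]; simp [h]
    calc (K.map (fun i => (((x :: l).count i : Int)) * g i)).sum
        = (K.map (fun i => ((l.count i : Int)) * g i + (if i = x then (1:Int) else 0) * g i)).sum := by
          simp only [h1]
      _ = (K.map (fun i => ((l.count i : Int)) * g i)).sum
          + (K.map (fun i => (if i = x then (1:Int) else 0) * g i)).sum := by
          rw [PySem.List.sum_map_add_int]
      _ = (l.map g).sum + g x := by
          rw [ih K hnd (fun y hy => hsub y (List.mem_cons_of_mem _ hy)), pv_sum_pick g K x hnd hx]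
      _ = ((x :: l).map g).sum := by simp [add_comm]

lemma pv_sum_ite_const (c t : Int) : ∀ (l : List Int),
    (l.map (fun b => if t ≤ b then c else 0)).sum = c * pvGE l t := by
  intro l
  induction l with
  | nil => simp [pvGE]
  | cons b l ih =>
    simp only [List.map_cons, List.sum_cons, ih, pvGE, List.countP_cons]
    by_cases h : t ≤ b <;> simp [h] <;> push_cast <;> ring

lemma pv_countP_split (t : Int) : ∀ (l : List Int),
    l.countP (fun b => t ≤ b) = l.countP (fun b => t + 1 ≤ b) + l.count t := by
  intro l
  induction l with
  | nil => simp
  | cons b l ih =>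
    simp only [List.countP_cons, List.count_cons, ih]
    by_cases h1 : t ≤ b <;> by_cases h2 : t + 1 ≤ b <;> by_cases h3 : b = t <;>
      simp [h1, h2, h3] <;> omega

lemma pv_bitCount_le (x : Int) (h : x.natAbs ≤ 2^31) : PySem.Int.bitCount x ≤ 32 := by
  by_cases hx : x = 0
  · simp [hx]
  · have h1 := PySem.Int.bitCount_le_bitLength x
    have h2 := PySem.Int.two_pow_bitLength_le x hx
    have h3 : PySem.Int.bitLength x - 1 ≤ 31 := by
      by_contra hc
      rw [not_le] at hc
      have : (2:Nat)^32 ≤ 2 ^ (PySem.Int.bitLength x - 1) :=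
        Nat.pow_le_pow_right (by norm_num) (by omega)
      have : (2:Nat)^32 ≤ 2^31 := le_trans (le_trans this h2) h
      norm_num at this
    omega

lemma pv_foldl_ite {α : Type} (K : List α) (p : α → Prop) [DecidablePred p] (f : α → Int) (a : Int) :
    K.foldl (fun r j => if p j then r + f j else r) a
      = a + (K.map (fun j => if p j then f j else 0)).sum := by
  have h : (fun (r : Int) j => if p j then r + f j else r)
      = (fun r j => r + if p j then f j else 0) := by
    funext r j; split <;> simp
  rw [h, PySem.List.foldl_add]

lemma pv_A_eq (nums : List Int) (k : Int) :
    countExcellentPairs nums k = pvC nums k := by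
  unfold countExcellentPairs
  set l := (PySem.Set.ofList nums).map (fun x => (PySem.Int.bitCount x : Int)) with hl
  dsimp only
  rw [PySem.Dict.keys_counter]
  have hnd : (PySem.Set.ofList l).Nodup := PySem.Set.nodup_ofList l
  have hsub : ∀ x ∈ l, x ∈ PySem.Set.ofList l := fun x hx => (PySem.Set.mem_ofList l x).mpr hx
  -- inner folds to sums
  have hinner : (fun (result : Int) (i : Int) =>
      (PySem.Set.ofList l).foldl (fun result j =>
        if i + j ≥ k then result + (PySem.Dict.counter l).getD i 0 * (PySem.Dict.counter l).getD j 0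
        else result) result)
      = (fun result i => result + (PySem.Dict.counter l).getD i 0 * pvGE l (k - i)) := by
    funext r i
    rw [pv_foldl_ite ((PySem.Set.ofList l)) (fun j => i + j ≥ k)
        (fun j => (PySem.Dict.counter l).getD i 0 * (PySem.Dict.counter l).getD j 0) r]
    congr 1
    have hmap : ((PySem.Set.ofList l).map (fun j =>
        if i + j ≥ k then (PySem.Dict.counter l).getD i 0 * (PySem.Dict.counter l).getD j 0 else 0))
        = ((PySem.Set.ofList l).map (fun j =>
            ((l.count j : Int)) * (if k - i ≤ j then (PySem.Dict.counter l).getD i 0 else 0))) := by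
      apply List.map_congr_left
      intro j _
      simp only [PySem.Dict.getD_counter]
      by_cases h : i + j ≥ k
      · rw [if_pos h, if_pos (by omega)]; ring
      · rw [if_neg h, if_neg (by omega)]; ring
    rw [hmap, pv_sum_count_mul _ l _ hnd hsub, pv_sum_ite_const]
  rw [hinner, PySem.List.foldl_add]
  have hmap2 : ((PySem.Set.ofList l).map (fun i => (PySem.Dict.counter l).getD i 0 * pvGE l (k - i)))
      = ((PySem.Set.ofList l).map (fun i => ((l.count i : Int)) * pvGE l (k - i))) := by
    apply List.map_congr_left
    intro i _
    rw [PySem.Dict.getD_counter]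
  rw [hmap2, pv_sum_count_mul _ l _ hnd hsub]
  simp [pvC, pvBits, pvGE, hl]

lemma pv_freq_spec : ∀ (s : List Int) (f : List Int), f.length = 33 →
    (∀ x ∈ s, PySem.Int.bitCount x ≤ 32) →
    (s.foldl (fun f x => PySem.List.pySetD f (PySem.Int.bitCount x : Int)
        (PySem.List.pyGetD f (PySem.Int.bitCount x : Int) 0 + 1)) f).length = 33
    ∧ ∀ n : Nat, n < 33 →
      PySem.List.pyGetD (s.foldl (fun f x => PySem.List.pySetD f (PySem.Int.bitCount x : Int)
          (PySem.List.pyGetD f (PySem.Int.bitCount x : Int) 0 + 1)) f) (n : Int) 0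
        = PySem.List.pyGetD f (n : Int) 0
          + (((s.map (fun x => (PySem.Int.bitCount x : Int))).count (n : Int) : Int)) := by
  intro s
  induction s with
  | nil =>
    intro f hf _
    refine ⟨hf, fun n _ => ?_⟩
    simp
  | cons x s ih =>
    intro f hf hb
    have hbx : PySem.Int.bitCount x ≤ 32 := hb x (List.mem_cons_self ..)
    have hlt : PySem.Int.bitCount x < f.length := by omega
    simp only [List.foldl_cons]
    set f' := PySem.List.pySetD f (PySem.Int.bitCount x : Int)
        (PySem.List.pyGetD f (PySem.Int.bitCount x : Int) 0 + 1) with hf'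
    have hf'len : f'.length = 33 := by rw [hf', PySem.List.length_pySetD, hf]
    obtain ⟨h1, h2⟩ := ih f' hf'len (fun y hy => hb y (List.mem_cons_of_mem _ hy))
    refine ⟨h1, fun n hn => ?_⟩
    rw [h2 n hn, hf', PySem.List.pyGetD_pySetD_natCast _ _ _ _ _ hlt]
    by_cases he : n = PySem.Int.bitCount x
    · rw [if_pos he, List.map_cons, List.count_cons, he]
      simp
      omega
    · rw [if_neg he, List.map_cons, List.count_cons]
      have hne : ((PySem.Int.bitCount x : Int) ≠ (n : Int)) := by
        intro h; exact he (by exact_mod_cast h.symm)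
      simp [hne]

lemma pv_suffix_spec (freq l : List Int)
    (hfreq : ∀ n : Nat, n < 33 → PySem.List.pyGetD freq (n:Int) 0 = (l.count (n:Int) : Int))
    (hb : ∀ a ∈ l, 0 ≤ a ∧ a ≤ 32) :
    ∀ m : Nat, m ≤ 33 →
      (((List.range m).map (fun q : Nat => ((32:Int) - (q:Int)))).foldl
        (fun s t => PySem.List.pySetD s t
          (PySem.List.pyGetD s (t + 1) 0 + PySem.List.pyGetD freq t 0))
        (List.replicate 34 0)).length = 34
      ∧ ∀ j : Nat, j < 34 →
        PySem.List.pyGetD (((List.range m).map (fun q : Nat => ((32:Int) - (q:Int)))).foldl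
          (fun s t => PySem.List.pySetD s t
            (PySem.List.pyGetD s (t + 1) 0 + PySem.List.pyGetD freq t 0))
          (List.replicate 34 0)) (j:Int) 0
          = if 33 - m ≤ j then pvGE l (j:Int) else 0 := by
  intro m
  induction m with
  | zero =>
    intro _
    refine ⟨by simp, fun j hj => ?_⟩
    simp only [List.range_zero, List.map_nil, List.foldl_nil, PySem.List.pyGetD_natCast]
    have hrep : (List.replicate 34 (0:Int)).getD j 0 = 0 := by
      rw [List.getD_eq_getElem?_getD, List.getElem?_replicate]
      split <;> simp
    rw [hrep]
    by_cases hc : 33 - 0 ≤ j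
    · have hj33 : j = 33 := by omega
      have : pvGE l (j:Int) = 0 := by
        unfold pvGE
        rw [List.countP_eq_zero.mpr]
        · simp
        · intro a ha
          have := hb a ha
          subst hj33
          simp
          omega
      rw [if_pos hc, this]
    · rw [if_neg hc]
  | succ m ih =>
    intro hm
    have hm' : m ≤ 33 := by omega
    obtain ⟨ihlen, ihget⟩ := ih hm'
    have hcast : ((32:Int) - (m:Int)) = ((32 - m : Nat) : Int) := by omega
    rw [List.range_succ, List.map_append, List.foldl_append]
    simp only [List.map_cons, List.map_nil, List.foldl_cons, List.foldl_nil]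
    set S := ((List.range m).map (fun q : Nat => ((32:Int) - (q:Int)))).foldl
        (fun s t => PySem.List.pySetD s t
          (PySem.List.pyGetD s (t + 1) 0 + PySem.List.pyGetD freq t 0))
        (List.replicate 34 0) with hS
    have hlt : 32 - m < S.length := by omega
    have hval : PySem.List.pyGetD S (((32 - m : Nat) : Int) + 1) 0 + PySem.List.pyGetD freq (((32 - m : Nat) : Int)) 0
        = pvGE l ((32 - m : Nat) : Int) := by
      have h1 : (((32 - m : Nat) : Int) + 1) = ((33 - m : Nat) : Int) := by omega
      have h2 : PySem.List.pyGetD S ((33 - m : Nat) : Int) 0 = pvGE l ((33 - m : Nat) : Int) := by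
        rw [ihget (33 - m) (by omega), if_pos (by omega)]
      rw [h1, h2, hfreq (32 - m) (by omega)]
      unfold pvGE
      have h3 : ((32 - m : Nat) : Int) + 1 = ((33 - m : Nat) : Int) := by omega
      rw [pv_countP_split ((32 - m : Nat) : Int) l, h3]
      push_cast
      ring
    constructor
    · rw [PySem.List.length_pySetD]; omega
    · intro j hj
      rw [hcast, hval, PySem.List.pyGetD_pySetD_natCast _ _ _ _ _ hlt]
      by_cases he : j = 32 - m
      · rw [if_pos he, if_pos (by omega), he]
      · rw [if_neg he, ihget j hj]
        by_cases hc : 33 - m ≤ j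
        · rw [if_pos hc, if_pos (by omega)]
        · rw [if_neg hc, if_neg (by omega)]

lemma pv_B_eq (nums : List Int) (k : Int)
    (hb : ∀ a ∈ pvBits nums, 0 ≤ a ∧ a ≤ 32) :
    countExcellentPairs_alt nums k = pvC nums k := by
  unfold countExcellentPairs_alt
  dsimp only
  have hbx : ∀ x ∈ PySem.Set.ofList nums, PySem.Int.bitCount x ≤ 32 := by
    intro x hx
    have hm : ((PySem.Int.bitCount x : Int)) ∈ pvBits nums := List.mem_map_of_mem hx
    exact_mod_cast (hb _ hm).2
  set l := pvBits nums with hlb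
  set freq := (PySem.Set.ofList nums).foldl
      (fun f x => PySem.List.pySetD f (PySem.Int.bitCount x : Int)
        (PySem.List.pyGetD f (PySem.Int.bitCount x : Int) 0 + 1))
      (List.replicate 33 (0:Int)) with hfreqdef
  obtain ⟨hflen, hfget⟩ := pv_freq_spec (PySem.Set.ofList nums) (List.replicate 33 (0:Int)) (by simp) hbx
  have hfreq : ∀ n : Nat, n < 33 → PySem.List.pyGetD freq (n:Int) 0 = (l.count (n:Int) : Int) := by
    intro n hn
    rw [hfreqdef, hfget n hn, PySem.List.pyGetD_natCast]
    have : (List.replicate 33 (0:Int)).getD n 0 = 0 := by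
      rw [List.getD_eq_getElem?_getD, List.getElem?_replicate]
      split <;> simp
    rw [this, hlb]
    simp [pvBits]
  have hr1 : PySem.List.pyRange 32 (-1) (-1)
      = (List.range 33).map (fun q : Nat => ((32:Int) - (q:Int))) := by
    rw [PySem.List.pyRange_neg_one]
    rfl
  rw [hr1]
  set suffix := ((List.range 33).map (fun q : Nat => ((32:Int) - (q:Int)))).foldl
      (fun s t => PySem.List.pySetD s t
        (PySem.List.pyGetD s (t + 1) 0 + PySem.List.pyGetD freq t 0))
      (List.replicate 34 (0:Int)) with hsufdef
  have hsuf : ∀ j : Nat, j < 34 → PySem.List.pyGetD suffix (j:Int) 0 = pvGE l (j:Int) := by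
    intro j hj
    obtain ⟨_, hget⟩ := pv_suffix_spec freq l hfreq hb 33 le_rfl
    rw [hsufdef, hget j hj, if_pos (by omega)]
  have hr2 : PySem.List.pyRange 0 33 1 = (List.range 33).map (fun n : Nat => (n:Int)) := by
    have h33 : ((33:Int)) = ((33:Nat):Int) := by norm_num
    rw [h33, PySem.List.pyRange_zero_natCast]
  rw [hr2]
  have hfun : (fun (total i : Int) =>
      if k - i ≤ 0 then total + PySem.List.pyGetD freq i 0 * PySem.List.pyGetD suffix 0 0
      else if k - i ≤ 32 then total + PySem.List.pyGetD freq i 0 * PySem.List.pyGetD suffix (k - i) 0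
      else total)
      = (fun total i => total +
          (if k - i ≤ 0 then PySem.List.pyGetD freq i 0 * PySem.List.pyGetD suffix 0 0
           else if k - i ≤ 32 then PySem.List.pyGetD freq i 0 * PySem.List.pyGetD suffix (k - i) 0
           else 0)) := by
    funext t i
    split_ifs <;> simp
  rw [hfun, PySem.List.foldl_add, List.map_map]
  have hcong : ((List.range 33).map ((fun i =>
      (if k - i ≤ 0 then PySem.List.pyGetD freq i 0 * PySem.List.pyGetD suffix 0 0
       else if k - i ≤ 32 then PySem.List.pyGetD freq i 0 * PySem.List.pyGetD suffix (k - i) 0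
       else 0)) ∘ (fun n : Nat => (n:Int))))
      = ((List.range 33).map (fun n : Nat => ((l.count ((n:Nat):Int) : Int)) * pvGE l (k - (n:Int)))) := by
    apply List.map_congr_left
    intro n hn
    have hn33 : n < 33 := List.mem_range.mp hn
    simp only [Function.comp]
    by_cases h0 : k - (n:Int) ≤ 0
    · rw [if_pos h0, hfreq n hn33]
      have hs0 : PySem.List.pyGetD suffix (0:Int) 0 = pvGE l 0 := by
        simpa using hsuf 0 (by omega)
      rw [hs0]
      have hcp : l.countP (fun b => (0:Int) ≤ b) = l.countP (fun b => k - (n:Int) ≤ b) := by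
        apply List.countP_congr
        intro a ha
        have hb2 := hb a ha
        have h1 : (0:Int) ≤ a := hb2.1
        have h2 : k - (n:Int) ≤ a := by omega
        simp [h1, h2]
      unfold pvGE
      rw [hcp]
    · rw [if_neg h0]
      by_cases h32 : k - (n:Int) ≤ 32
      · rw [if_pos h32, hfreq n hn33]
        have htn : (k - (n:Int)) = (((k - (n:Int)).toNat : Nat) : Int) := by omega
        have : PySem.List.pyGetD suffix (k - (n:Int)) 0 = pvGE l (k - (n:Int)) := by
          rw [htn]
          exact hsuf (k - (n:Int)).toNat (by omega)
        rw [this]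
      · rw [if_neg h32]
        have : pvGE l (k - (n:Int)) = 0 := by
          unfold pvGE
          rw [List.countP_eq_zero.mpr]
          · simp
          · intro a ha
            have := hb a ha
            simp only [decide_eq_true_eq]
            omega
        rw [this, mul_zero]
  rw [hcong]
  have hK : ((List.range 33).map (fun n : Nat => ((l.count ((n:Nat):Int) : Int)) * pvGE l (k - (n:Int))))
      = (((List.range 33).map (fun n : Nat => (n:Int))).map (fun i => ((l.count i : Int)) * pvGE l (k - i))) := by
    rw [List.map_map]
    rfl
  rw [hK, pv_sum_count_mul (fun i => pvGE l (k - i)) l _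
    ((List.nodup_range).map (fun a b h => by exact_mod_cast h))
    (by
      intro a ha
      have := hb a ha
      refine List.mem_map.mpr ⟨a.toNat, List.mem_range.mpr (by omega), by omega⟩)]
  simp [pvC, hlb]

lemma pv_bits_mem (nums : List Int) (h : ∀ x ∈ nums, pvDomInt x = true) :
    ∀ a ∈ pvBits nums, 0 ≤ a ∧ a ≤ 32 := by
  intro a ha
  obtain ⟨x, hx, rfl⟩ := List.mem_map.mp ha
  have hxn : x ∈ nums := (PySem.Set.mem_ofList nums x).mp hx
  have hdx := h x hxn
  unfold pvDomInt at hdx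
  simp only [decide_eq_true_eq] at hdx
  have habs : x.natAbs ≤ 2^31 := by omega
  have hbc := pv_bitCount_le x habs
  exact ⟨Int.natCast_nonneg _, by exact_mod_cast hbc⟩

-- ===== VERDICT (by name: the statement is the Claim_ definition above) =====
theorem countExcellentPairs_spec : Claim_equal_countExcellentPairs := by
  intro nums k hd
  unfold Spec_countExcellentPairs
  rw [pv_A_eq, pv_B_eq]
  apply pv_bits_mem
  intro x hx
  unfold Dom_countExcellentPairs at hd
  simp only [Bool.and_eq_true, List.all_eq_true] at hd
  exact hd.1 x hx
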